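-- pv_equiv track=rewrite | github.com/miliar/Code_Jam_Webscraper | solutions_python/Problem_209/700.py | max_syrup
-- ===== SOURCE A (Python) =====
-- def max_syrup(pans, k, base = False):
--     n = len(pans)
--     maxa = 0
--     if k == 0:
--         return 0
--     if n == k:
--         if base:
--             maxa += pans[0][0]**2
--         for pan in pans:
--             maxa += 2*pan[0]*pan[1]
--         return maxa
--     for i in range(n-k+1):
--         temp = 0
--         if base:
--             temp += pans[i][0]**2
--         temp += 2*pans[i][0]*pans[i][1]
--         temp += max_syrup(pans[i+1:], k-1)
--         if temp > maxa:
--             maxa = temp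
--     return maxa
-- ===== SOURCE B (Python) =====
-- def max_syrup(pans, k, base=False):
--     n = len(pans)
--     if k <= 0 or k > n:
--         return 0
--     v = [2 * p[0] * p[1] for p in pans]
--     suffix = [0] * (n + 1)
--     for i in range(n - 1, -1, -1):
--         suffix[i] = suffix[i + 1] + v[i]
--     if k == n:
--         total = suffix[0]
--         if base:
--             total += pans[0][0] ** 2
--         return total
--     # Bottom-up memoization of the recurrence: F[i][m] is its value for the
--     # suffix pans[i:] choosing m pans (no first-pan bonus below the top level).
--     F = [[0] * k for _ in range(n + 1)]
--     for i in range(n - 1, -1, -1):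
--         rem = n - i
--         for m in range(1, k):
--             if m == rem:
--                 F[i][m] = suffix[i]
--             elif m < rem:
--                 best = 0
--                 for j in range(i, n - m + 1):
--                     c = v[j] + F[j + 1][m - 1]
--                     if c > best:
--                         best = c
--                 F[i][m] = best
--     best = 0
--     for i in range(n - k + 1):
--         c = v[i] + F[i + 1][k - 1]
--         if base:
--             c += pans[i][0] ** 2
--         if c > best:
--             best = c
--     return best
-- ===== Notes on version B (the rewrite author's own statement) =====
-- stated objective: alternative
-- what changed: A's top-down recursion over every choice of first pan is replaced by bottom-up memoization: a suffix-sum array plus an (n+1) x k table F[i][m] holding the recurrence's value for m pans chosen from the suffix pans[i:], filled right to left (a timing run's input family showed no measured speed-up); Pre_ only excludes inputs where A raises (negative k, or a pan with fewer than 2 entries).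
import Mathlib
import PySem

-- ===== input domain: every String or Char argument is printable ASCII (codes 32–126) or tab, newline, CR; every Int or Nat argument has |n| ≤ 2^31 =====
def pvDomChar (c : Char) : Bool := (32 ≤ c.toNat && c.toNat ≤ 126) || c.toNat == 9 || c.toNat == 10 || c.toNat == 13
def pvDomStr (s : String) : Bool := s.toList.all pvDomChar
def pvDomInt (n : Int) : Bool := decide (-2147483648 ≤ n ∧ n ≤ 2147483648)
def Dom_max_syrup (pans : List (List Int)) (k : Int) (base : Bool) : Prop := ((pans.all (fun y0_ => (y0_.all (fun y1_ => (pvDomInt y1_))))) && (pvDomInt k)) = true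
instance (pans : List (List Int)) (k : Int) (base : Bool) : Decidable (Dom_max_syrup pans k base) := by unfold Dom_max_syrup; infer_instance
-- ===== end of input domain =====

-- B computes A's recurrence bottom-up over suffixes (memoization table) instead of
-- A's top-down recursion (objective: alternative).

-- ===== PORT A =====
-- fuel makes the recursion total; on Pre_ inputs pans.length + 1 levels always suffice
def max_syrupAux : Nat → List (List Int) → Int → Bool → Int
  | 0, _, _, _ => 0
  | fuel + 1, pans, k, base =>
    let n : Int := pans.length
    if k = 0 then 0
    else if n = k then
      let maxa : Int := if base then (PySem.List.pyGetD (PySem.List.pyGetD pans 0 []) 0 0) ^ 2 else 0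
      pans.foldl (fun maxa pan => maxa + 2 * PySem.List.pyGetD pan 0 0 * PySem.List.pyGetD pan 1 0) maxa
    else
      (PySem.List.pyRange 0 (n - k + 1) 1).foldl (fun maxa i =>
        let temp : Int :=
          (if base then (PySem.List.pyGetD (PySem.List.pyGetD pans i []) 0 0) ^ 2 else 0)
          + 2 * PySem.List.pyGetD (PySem.List.pyGetD pans i []) 0 0
              * PySem.List.pyGetD (PySem.List.pyGetD pans i []) 1 0
          + max_syrupAux fuel (PySem.List.slice pans (some (i + 1)) none) (k - 1) false
        if temp > maxa then temp else maxa) 0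

def max_syrup (pans : List (List Int)) (k : Int) (base : Bool) : Int :=
  max_syrupAux (pans.length + 1) pans k base

-- ===== PORT B =====
-- body of B's row-filling loop (one row of the memo table, prepended to the rows below it)
def altRowsStep (n k : Int) (v suffix : List Int) (rows : List (List Int)) (i : Int) :
    List (List Int) :=
  let rem := n - i
  let row := (PySem.List.pyRange 0 k 1).map (fun m =>
    if m = 0 then 0
    else if m = rem then PySem.List.pyGetD suffix i 0
    else if m < rem then
      (PySem.List.pyRange i (n - m + 1) 1).foldl (fun best j =>
        let c := PySem.List.pyGetD v j 0 +
          PySem.List.pyGetD (PySem.List.pyGetD rows (j - i) []) (m - 1) 0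
        if c > best then c else best) 0
    else 0)
  row :: rows

def max_syrup_alt (pans : List (List Int)) (k : Int) (base : Bool) : Int :=
  let n : Int := pans.length
  if k ≤ 0 ∨ n < k then 0
  else
    let v := pans.map (fun p => 2 * PySem.List.pyGetD p 0 0 * PySem.List.pyGetD p 1 0)
    let suffix := (PySem.List.pyRange (n - 1) (-1) (-1)).foldl
        (fun acc i => (PySem.List.pyGetD acc 0 0 + PySem.List.pyGetD v i 0) :: acc) [0]
    if k = n then
      let total := PySem.List.pyGetD suffix 0 0
      if base then total + (PySem.List.pyGetD (PySem.List.pyGetD pans 0 []) 0 0) ^ 2 else total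
    else
      let F := (PySem.List.pyRange (n - 1) (-1) (-1)).foldl
        (altRowsStep n k v suffix) [List.replicate k.toNat 0]
      (PySem.List.pyRange 0 (n - k + 1) 1).foldl (fun best i =>
        let c := PySem.List.pyGetD v i 0 +
            PySem.List.pyGetD (PySem.List.pyGetD F (i + 1) []) (k - 1) 0
        let c := if base then
            c + (PySem.List.pyGetD (PySem.List.pyGetD pans i []) 0 0) ^ 2 else c
        if c > best then c else best) 0

-- ===== PRECONDITION & SPEC =====
-- Pre_ excludes exactly the inputs where A raises: negative k (unbounded recursion ends in an
-- IndexError) and, when 1 ≤ k ≤ len(pans), any pan with fewer than 2 entries (IndexError).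
def Pre_max_syrup (pans : List (List Int)) (k : Int) (base : Bool) : Prop :=
  0 ≤ k ∧ (k = 0 ∨ (pans.length : Int) < k ∨ ∀ p ∈ pans, 2 ≤ p.length)
instance (pans : List (List Int)) (k : Int) (base : Bool) : Decidable (Pre_max_syrup pans k base) := by unfold Pre_max_syrup; infer_instance

def pvWitness_max_syrup : List (List Int) × Int × Bool := ([[3, 1], [1, 2], [2, 2]], 2, true)

def Spec_max_syrup (pans : List (List Int)) (k : Int) (base : Bool) (out : Int) : Prop := out = max_syrup_alt pans k base
instance (pans : List (List Int)) (k : Int) (base : Bool) (out : Int) : Decidable (Spec_max_syrup pans k base out) := by unfold Spec_max_syrup; infer_instance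

-- ===== CLAIM (what is proved, stated in full; the proofs are below) =====
def Claim_equal_max_syrup : Prop := ∀ (pans : List (List Int)) (k : Int) (base : Bool), Dom_max_syrup pans k base → Pre_max_syrup pans k base → Spec_max_syrup pans k base (max_syrup pans k base)

-- ===== LEMMAS AND PROOFS =====

-- value of one pan and total value of a list of pans
def pvVa (p : List Int) : Int := 2 * PySem.List.pyGetD p 0 0 * PySem.List.pyGetD p 1 0
def pvSum (l : List (List Int)) : Int := (l.map pvVa).sum
def pvBonus (b : Bool) (p : List Int) : Int := if b then (PySem.List.pyGetD p 0 0) ^ 2 else 0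
def pvV (pans : List (List Int)) : List Int :=
  pans.map (fun p => 2 * PySem.List.pyGetD p 0 0 * PySem.List.pyGetD p 1 0)

theorem pvSum_cons (p : List Int) (l : List (List Int)) : pvSum (p :: l) = pvVa p + pvSum l := by
  simp [pvSum]

theorem foldl_add_va (l : List (List Int)) (c : Int) :
    l.foldl (fun a p => a + 2 * PySem.List.pyGetD p 0 0 * PySem.List.pyGetD p 1 0) c
      = c + pvSum l := by
  induction l generalizing c with
  | nil => simp [pvSum]
  | cons p t ih => simp only [List.foldl_cons, ih, pvSum_cons, pvVa]; ring

theorem foldl_if_max (g : Int → Int) (r : List Int) (c : Int) :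
    r.foldl (fun a i => if g i > a then g i else a) c = r.foldl (fun a i => max a (g i)) c := by
  induction r generalizing c with
  | nil => rfl
  | cons x t ih =>
      simp only [List.foldl_cons, ih]
      congr 1
      omega

theorem foldl_max_congr {α : Type} (g g' : α → Int) (r : List α) (c : Int)
    (h : ∀ i ∈ r, g i = g' i) :
    r.foldl (fun a i => max a (g i)) c = r.foldl (fun a i => max a (g' i)) c := by
  induction r generalizing c with
  | nil => rfl
  | cons x t ih => simp only [List.foldl_cons, h x List.mem_cons_self, ih _ fun i hi => h i (List.mem_cons_of_mem _ hi)]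

-- the candidate value A's loop computes for first index i
def pvTemp (f : Nat) (pans : List (List Int)) (k : Int) (b : Bool) (i : Int) : Int :=
  (if b then (PySem.List.pyGetD (PySem.List.pyGetD pans i []) 0 0) ^ 2 else 0)
  + 2 * PySem.List.pyGetD (PySem.List.pyGetD pans i []) 0 0
      * PySem.List.pyGetD (PySem.List.pyGetD pans i []) 1 0
  + max_syrupAux f (PySem.List.slice pans (some (i + 1)) none) (k - 1) false

theorem aux_loop (f : Nat) (pans : List (List Int)) (k : Int) (b : Bool)
    (hk : k ≠ 0) (hnk : ((pans.length : Int)) ≠ k) :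
    max_syrupAux (f + 1) pans k b
      = (List.range ((pans.length : Int) - k + 1).toNat).foldl
          (fun a (kk : Nat) => max a (pvTemp f pans k b (kk : Int))) 0 := by
  simp only [max_syrupAux, if_neg hk, if_neg hnk]
  rw [foldl_if_max]
  rw [PySem.List.pyRange_one, List.foldl_map]
  simp only [zero_add, sub_zero]
  rfl

theorem aux_zero (f : Nat) (l : List (List Int)) (m : Int) (b : Bool)
    (h : (l.length : Int) < m) : max_syrupAux (f + 1) l m b = 0 := by
  have hm0 : m ≠ 0 := by have := Int.natCast_nonneg l.length; omega
  have hne : (l.length : Int) ≠ m := by omega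
  have hnil : PySem.List.pyRange 0 ((l.length : Int) - m + 1) 1 = [] :=
    PySem.List.pyRange_one_eq_nil (by omega)
  simp only [max_syrupAux, if_neg hm0, if_neg hne, hnil, List.foldl_nil]

theorem aux_k0 (f : Nat) (l : List (List Int)) (b : Bool) : max_syrupAux (f + 1) l 0 b = 0 := by
  simp [max_syrupAux]

theorem aux_exact (f : Nat) (l : List (List Int)) (m : Int) (b : Bool)
    (h : (l.length : Int) = m) (h1 : 1 ≤ m) :
    max_syrupAux (f + 1) l m b = pvBonus b (PySem.List.pyGetD l 0 []) + pvSum l := by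
  have hm0 : m ≠ 0 := by omega
  simp only [max_syrupAux, if_neg hm0, if_pos h, foldl_add_va, pvBonus]

theorem aux_sum (f : Nat) (l : List (List Int)) (m : Int)
    (h : (l.length : Int) = m) (h0 : 0 ≤ m) :
    max_syrupAux (f + 1) l m false = pvSum l := by
  by_cases hm : 1 ≤ m
  · rw [aux_exact f l m false h hm]; simp [pvBonus]
  · have hm0 : m = 0 := by omega
    subst hm0
    rw [aux_k0]
    have : l = [] := by
      cases l with
      | nil => rfl
      | cons a t => exfalso; have : ((a :: t).length : Int) = ↑t.length + 1 := by simp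
                    omega
    simp [this, pvSum]

theorem aux_fuel (f1 : Nat) : ∀ (f2 : Nat) (l : List (List Int)) (k : Int) (b : Bool),
    l.length < f1 → l.length < f2 → 0 ≤ k →
    max_syrupAux f1 l k b = max_syrupAux f2 l k b := by
  induction f1 with
  | zero => intro f2 l k b h1 h2 hk; omega
  | succ f1 ih =>
    intro f2 l k b h1 h2 hk
    cases f2 with
    | zero => omega
    | succ f2 =>
      by_cases hk0 : k = 0
      · subst hk0; rw [aux_k0, aux_k0]
      · by_cases hnk : (l.length : Int) = k
        · have h1k : 1 ≤ k := by omega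
          rw [aux_exact f1 l k b hnk h1k, aux_exact f2 l k b hnk h1k]
        · rw [aux_loop f1 l k b hk0 hnk, aux_loop f2 l k b hk0 hnk]
          refine foldl_max_congr _ _ _ _ fun kk hkk => ?_
          have hkkb : (kk : Int) < (l.length : Int) - k + 1 := by
            have := List.mem_range.mp hkk
            omega
          have hk1 : (1:Int) ≤ k := by omega
          have hlen1 : 1 ≤ l.length := by omega
          simp only [pvTemp]
          congr 1
          have hsl : PySem.List.slice l (some ((kk : Int) + 1)) none = l.drop (kk + 1) := by
            have : ((kk : Int) + 1) = ((kk + 1 : Nat) : Int) := by push_cast; ring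
            rw [this, PySem.List.slice_from_natCast]
          rw [hsl]
          refine ih f2 (l.drop (kk + 1)) (k - 1) false ?_ ?_ (by omega)
          · simp; omega
          · simp; omega

-- ---- indexing helpers ----

theorem pyGetD_drop {α : Type} (l : List α) (i kk : Nat) (d : α) :
    PySem.List.pyGetD (l.drop i) ((kk : Nat) : Int) d
      = PySem.List.pyGetD l ((i + kk : Nat) : Int) d := by
  rw [PySem.List.pyGetD_natCast, PySem.List.pyGetD_natCast]
  simp [List.getD, List.getElem?_drop]

theorem v_getD (pans : List (List Int)) (j : Nat) (hj : j < pans.length) :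
    PySem.List.pyGetD (pvV pans) ((j : Nat) : Int) 0
      = pvVa (PySem.List.pyGetD pans ((j : Nat) : Int) []) := by
  rw [PySem.List.pyGetD_natCast, PySem.List.pyGetD_natCast]
  simp [pvV, pvVa, List.getD, List.getElem?_map, List.getElem?_eq_getElem hj]

-- ---- suffix-sum table ----

def pvSuf (pans : List (List Int)) (i : Nat) : List Int :=
  (List.range (pans.length + 1 - i)).map (fun t => pvSum (pans.drop (i + t)))

theorem pvSuf_getD (pans : List (List Int)) (i : Nat) (hi : i ≤ pans.length) :
    PySem.List.pyGetD (pvSuf pans 0) ((i : Nat) : Int) 0 = pvSum (pans.drop i) := by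
  rw [PySem.List.pyGetD_natCast]
  simp only [pvSuf, Nat.sub_zero, Nat.zero_add]
  rw [List.getD, List.getElem?_map, List.getElem?_range (by omega : i < pans.length + 1)]
  simp

theorem suf_inv (pans : List (List Int)) : ∀ (i : Nat), i ≤ pans.length →
    (PySem.List.pyRange ((i : Int) - 1) (-1) (-1)).foldl
      (fun acc j => (PySem.List.pyGetD acc 0 0 + PySem.List.pyGetD (pvV pans) j 0) :: acc)
      (pvSuf pans i)
      = pvSuf pans 0 := by
  intro i
  induction i with
  | zero =>
    intro _
    rw [show ((0 : Nat) : Int) - 1 = -1 by norm_num,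
      PySem.List.pyRange_neg_one_eq_nil le_rfl, List.foldl_nil]
  | succ i ih =>
    intro hi
    have hcons : PySem.List.pyRange (((i + 1 : Nat) : Int) - 1) (-1) (-1)
        = ((i : Nat) : Int) :: PySem.List.pyRange (((i : Nat) : Int) - 1) (-1) (-1) := by
      rw [show (((i + 1 : Nat) : Int) - 1) = ((i : Nat) : Int) by push_cast; ring]
      exact PySem.List.pyRange_neg_one_cons (by omega)
    rw [hcons, List.foldl_cons]
    have hstep : (PySem.List.pyGetD (pvSuf pans (i + 1)) 0 0
          + PySem.List.pyGetD (pvV pans) ((i : Nat) : Int) 0) :: pvSuf pans (i + 1)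
        = pvSuf pans i := by
      have hiN : i < pans.length := by omega
      have hhead : PySem.List.pyGetD (pvSuf pans (i + 1)) 0 0 = pvSum (pans.drop (i + 1)) := by
        have hlen : pans.length + 1 - (i + 1) = (pans.length - (i + 1)) + 1 := by omega
        simp only [pvSuf, hlen, List.range_succ_eq_map, List.map_cons,
          PySem.List.pyGetD_zero_cons, Nat.add_zero]
      have hdropc : pans.drop i = pans[i] :: pans.drop (i + 1) :=
        List.drop_eq_getElem_cons hiN
      have hv : PySem.List.pyGetD (pvV pans) ((i : Nat) : Int) 0
          = pvVa (PySem.List.pyGetD pans ((i : Nat) : Int) []) := v_getD pans i hiN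
      have hgi : PySem.List.pyGetD pans ((i : Nat) : Int) [] = pans[i] := by
        rw [PySem.List.pyGetD_natCast]
        simp [List.getD, List.getElem?_eq_getElem hiN]
      have hsum : pvSum (pans.drop (i + 1)) + pvVa pans[i] = pvSum (pans.drop i) := by
        rw [hdropc, pvSum_cons]; ring
      have hlen2 : pans.length + 1 - i = (pans.length - i) + 1 := by omega
      rw [hhead, hv, hgi]
      simp only [pvSuf, hlen2, List.range_succ_eq_map, List.map_cons, List.map_map,
        Nat.add_zero]
      rw [hsum]
      congr 1
      have : pans.length + 1 - (i + 1) = pans.length - i := by omega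
      rw [this]
      apply List.map_congr_left
      intro t _
      simp only [Function.comp_apply]
      congr 2
      omega
    rw [hstep]
    exact ih (by omega)

-- ---- memo-table rows ----

def pvRow (pans : List (List Int)) (k : Int) (i : Nat) : List Int :=
  (PySem.List.pyRange 0 k 1).map (fun m =>
    max_syrupAux ((pans.drop i).length + 1) (pans.drop i) m false)

def pvRows (pans : List (List Int)) (k : Int) (i : Nat) : List (List Int) :=
  (List.range (pans.length + 1 - i)).map (fun t => pvRow pans k (i + t))

theorem pvRow_getD (pans : List (List Int)) (k : Int) (i : Nat) (m : Int)
    (h0 : 0 ≤ m) (hk : m < k) :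
    PySem.List.pyGetD (pvRow pans k i) m 0
      = max_syrupAux ((pans.drop i).length + 1) (pans.drop i) m false := by
  exact PySem.List.pyGetD_map_pyRange_of_nonneg _ _ _ _ h0 hk

theorem pvRows_getD (pans : List (List Int)) (k : Int) (i j : Nat)
    (hj : i + j ≤ pans.length) :
    PySem.List.pyGetD (pvRows pans k i) ((j : Nat) : Int) []
      = pvRow pans k (i + j) := by
  rw [PySem.List.pyGetD_natCast]
  simp only [pvRows]
  rw [List.getD, List.getElem?_map, List.getElem?_range (by omega : j < pans.length + 1 - i)]
  simp

theorem pvRows_last (pans : List (List Int)) (k : Int) (hk : 1 ≤ k) :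
    pvRows pans k pans.length = [List.replicate k.toNat 0] := by
  have h1 : pans.length + 1 - pans.length = 1 := by omega
  simp only [pvRows, h1, List.range_one, List.map_cons, List.map_nil, Nat.add_zero]
  congr 1
  have hdrop : pans.drop pans.length = [] := List.drop_length
  simp only [pvRow, hdrop, List.length_nil]
  have hmap : (PySem.List.pyRange 0 k 1).map
      (fun m => max_syrupAux 1 ([] : List (List Int)) m false)
      = (PySem.List.pyRange 0 k 1).map (fun _ => (0 : Int)) := by
    refine List.map_congr_left fun m hm => ?_
    have hmem := (PySem.List.mem_pyRange_one).mp hm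
    obtain ⟨hml, hmr⟩ := hmem
    by_cases hm0 : m = 0
    · subst hm0; exact aux_k0 0 [] false
    · refine aux_zero 0 [] m false ?_
      simp only [List.length_nil, Int.natCast_zero]
      omega
  rw [hmap, List.map_const', PySem.List.length_pyRange_one]
  simp

theorem row_step (pans : List (List Int)) (k : Int) (i : Nat)
    (hk : 1 ≤ k) (hi : i < pans.length) :
    altRowsStep (pans.length : Int) k (pvV pans) (pvSuf pans 0)
        (pvRows pans k (i + 1)) ((i : Nat) : Int)
      = pvRows pans k i := by
  have hlenN : (pans.drop i).length = pans.length - i := by simp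
  have hlen : ((pans.drop i).length : Int) = (pans.length : Int) - i := by
    rw [hlenN]; omega
  have hrows : pvRows pans k i = pvRow pans k i :: pvRows pans k (i + 1) := by
    have h1 : pans.length + 1 - i = (pans.length - i) + 1 := by omega
    have h2 : pans.length + 1 - (i + 1) = pans.length - i := by omega
    simp only [pvRows, h1, h2, List.range_succ_eq_map, List.map_cons, List.map_map, Nat.add_zero]
    congr 1
    apply List.map_congr_left
    intro t _
    simp only [Function.comp_apply]
    congr 1
    omega
  rw [hrows]
  simp only [altRowsStep]
  congr 1
  simp only [pvRow]
  apply List.map_congr_left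
  intro m hm
  obtain ⟨hm0, hmk⟩ := PySem.List.mem_pyRange_one.mp hm
  by_cases hz : m = 0
  · subst hz
    rw [if_pos rfl, aux_k0]
  · rw [if_neg hz]
    by_cases hrem : m = (pans.length : Int) - ↑i
    · rw [if_pos hrem, pvSuf_getD pans i (by omega),
        aux_sum ((pans.drop i).length) (pans.drop i) m (by omega) hm0]
    · rw [if_neg hrem]
      by_cases hlt : m < (pans.length : Int) - ↑i
      · rw [if_pos hlt]
        rw [aux_loop ((pans.drop i).length) (pans.drop i) m false hz (by omega)]
        rw [foldl_if_max (fun j => PySem.List.pyGetD (pvV pans) j 0 +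
              PySem.List.pyGetD (PySem.List.pyGetD (pvRows pans k (i + 1)) (j - ↑i) []) (m - 1) 0)]
        rw [PySem.List.pyRange_one, List.foldl_map]
        have hNN : ((pans.length : Int) - m + 1 - ↑i).toNat
            = (((pans.drop i).length : Int) - m + 1).toNat := by omega
        rw [hNN]
        refine foldl_max_congr _ _ _ _ fun kk hkk => ?_
        have hkkN : (kk : Int) < ((pans.drop i).length : Int) - m + 1 := by
          have h := List.mem_range.mp hkk
          omega
        have hkk2 : i + 1 + kk ≤ pans.length := by omega
        have e1 : (↑i + (kk : Int) - ↑i) = (kk : Int) := by ring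
        rw [e1]
        rw [pvRows_getD pans k (i + 1) kk (by omega)]
        rw [pvRow_getD pans k (i + 1 + kk) (m - 1) (by omega) (by omega)]
        rw [show (↑i + (kk : Int)) = ((i + kk : Nat) : Int) by push_cast; ring]
        rw [v_getD pans (i + kk) (by omega)]
        have e7 : PySem.List.slice (pans.drop i) (some ((kk : Int) + 1)) none
            = pans.drop (i + 1 + kk) := by
          rw [show ((kk : Int) + 1) = ((kk + 1 : Nat) : Int) by push_cast; ring,
            PySem.List.slice_from_natCast, List.drop_drop]
          congr 1
          omega
        have e8 : max_syrupAux ((pans.drop i).length) (pans.drop (i + 1 + kk)) (m - 1) false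
            = max_syrupAux ((pans.drop (i + 1 + kk)).length + 1) (pans.drop (i + 1 + kk)) (m - 1)
              false := by
          refine aux_fuel _ _ _ _ _ ?_ ?_ (by omega)
          · simp only [List.length_drop]; omega
          · simp only [List.length_drop]; omega
        simp only [pvTemp, pyGetD_drop pans i kk, e7, e8, pvVa, Bool.false_eq_true, if_false]
        ring
      · rw [if_neg hlt]
        rw [aux_zero ((pans.drop i).length) (pans.drop i) m false (by omega)]

theorem rows_inv (pans : List (List Int)) (k : Int) (hk : 1 ≤ k) :
    ∀ (i : Nat), i ≤ pans.length →
    (PySem.List.pyRange ((i : Int) - 1) (-1) (-1)).foldl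
      (altRowsStep (pans.length : Int) k (pvV pans) (pvSuf pans 0))
      (pvRows pans k i)
      = pvRows pans k 0 := by
  intro i
  induction i with
  | zero =>
    intro _
    rw [show ((0 : Nat) : Int) - 1 = -1 by norm_num,
      PySem.List.pyRange_neg_one_eq_nil le_rfl, List.foldl_nil]
  | succ i ih =>
    intro hi
    have hcons : PySem.List.pyRange (((i + 1 : Nat) : Int) - 1) (-1) (-1)
        = ((i : Nat) : Int) :: PySem.List.pyRange (((i : Nat) : Int) - 1) (-1) (-1) := by
      rw [show (((i + 1 : Nat) : Int) - 1) = ((i : Nat) : Int) by push_cast; ring]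
      exact PySem.List.pyRange_neg_one_cons (by omega)
    rw [hcons, List.foldl_cons, row_step pans k i hk (by omega)]
    exact ih (by omega)

-- ===== VERDICT (by name: the statement is the Claim_ definition above) =====
theorem max_syrup_spec : Claim_equal_max_syrup := by
  intro pans k base hdom hpre
  unfold Spec_max_syrup
  obtain ⟨hk0, _⟩ := hpre
  by_cases hk : k = 0
  · subst hk
    rw [show max_syrup pans 0 base = 0 from aux_k0 pans.length pans base]
    simp only [max_syrup_alt]
    rw [if_pos (Or.inl le_rfl)]
  · have hk1 : (1 : Int) ≤ k := by omega
    by_cases hkn : (pans.length : Int) < k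
    · rw [show max_syrup pans k base = 0 from aux_zero pans.length pans k base hkn]
      simp only [max_syrup_alt]
      rw [if_pos (Or.inr hkn)]
    · have hsuffix : (PySem.List.pyRange ((pans.length : Int) - 1) (-1) (-1)).foldl
          (fun acc j => (PySem.List.pyGetD acc 0 0 + PySem.List.pyGetD (pvV pans) j 0) :: acc)
          [0] = pvSuf pans 0 := by
        have hinit : pvSuf pans pans.length = [0] := by
          have h1 : pans.length + 1 - pans.length = 1 := by omega
          simp only [pvSuf, h1, List.range_one, List.map_cons, List.map_nil, Nat.add_zero]
          rw [List.drop_length]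
          simp [pvSum]
        rw [← hinit]
        exact suf_inv pans pans.length le_rfl
      have hsuf0 : PySem.List.pyGetD (pvSuf pans 0) 0 0 = pvSum pans := by
        have h := pvSuf_getD pans 0 (by omega)
        simpa using h
      by_cases heq : k = (pans.length : Int)
      · rw [show max_syrup pans k base
            = pvBonus base (PySem.List.pyGetD pans 0 []) + pvSum pans
          from aux_exact pans.length pans k base heq.symm hk1]
        simp only [max_syrup_alt]
        rw [if_neg (by push Not; exact ⟨by omega, by omega⟩), if_pos heq]
        rw [show pans.map (fun p => 2 * PySem.List.pyGetD p 0 0 * PySem.List.pyGetD p 1 0)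
            = pvV pans from rfl]
        rw [hsuffix, hsuf0]
        cases base <;> simp [pvBonus] <;> ring
      · have hlt : k < (pans.length : Int) := by omega
        rw [show max_syrup pans k base = max_syrupAux (pans.length + 1) pans k base from rfl]
        rw [aux_loop pans.length pans k base hk (by omega)]
        simp only [max_syrup_alt]
        rw [if_neg (by push Not; exact ⟨by omega, by omega⟩), if_neg heq]
        rw [show pans.map (fun p => 2 * PySem.List.pyGetD p 0 0 * PySem.List.pyGetD p 1 0)
            = pvV pans from rfl]
        rw [hsuffix, ← pvRows_last pans k hk1, rows_inv pans k hk1 pans.length le_rfl]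
        rw [foldl_if_max (fun j =>
          if base then
            (PySem.List.pyGetD (pvV pans) j 0 +
              PySem.List.pyGetD (PySem.List.pyGetD (pvRows pans k 0) (j + 1) []) (k - 1) 0)
              + (PySem.List.pyGetD (PySem.List.pyGetD pans j []) 0 0) ^ 2
          else
            PySem.List.pyGetD (pvV pans) j 0 +
              PySem.List.pyGetD (PySem.List.pyGetD (pvRows pans k 0) (j + 1) []) (k - 1) 0)]
        rw [PySem.List.pyRange_one, List.foldl_map]
        simp only [zero_add, sub_zero]
        refine (foldl_max_congr _ _ _ _ fun kk hkk => ?_).symm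
        have hkkN : (kk : Int) < (pans.length : Int) - k + 1 := by
          have h := List.mem_range.mp hkk
          omega
        have hkk1 : kk + 1 ≤ pans.length := by omega
        have e2 : PySem.List.pyGetD (pvRows pans k 0) ((kk : Int) + 1) []
            = pvRow pans k (kk + 1) := by
          rw [show ((kk : Int) + 1) = ((kk + 1 : Nat) : Int) by push_cast; ring]
          have h := pvRows_getD pans k 0 (kk + 1) (by omega)
          simpa using h
        rw [e2, pvRow_getD pans k (kk + 1) (k - 1) (by omega) (by omega)]
        rw [v_getD pans kk (by omega)]
        have e7 : PySem.List.slice pans (some ((kk : Int) + 1)) none = pans.drop (kk + 1) := by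
          rw [show ((kk : Int) + 1) = ((kk + 1 : Nat) : Int) by push_cast; ring,
            PySem.List.slice_from_natCast]
        have e8 : max_syrupAux pans.length (pans.drop (kk + 1)) (k - 1) false
            = max_syrupAux ((pans.drop (kk + 1)).length + 1) (pans.drop (kk + 1)) (k - 1)
              false := by
          refine aux_fuel _ _ _ _ _ ?_ ?_ (by omega)
          · simp only [List.length_drop]; omega
          · simp only [List.length_drop]; omega
        simp only [pvTemp, e7, e8, pvVa]
        cases base <;> simp <;> ring
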